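-- pv_equiv track=rewrite | github.com/cis-04/primitive-python | 12.py | solution
-- ===== SOURCE A (Python) =====
-- def solution(n, m):
--     sum_n = 0
--     sum_m = 0
--     for i in range(1, n):
--         sum_n += i
--     for i in range(1, m + 1):
--         sum_m += i
--     return sum_m - sum_n
-- ===== SOURCE B (Python) =====
-- def solution(n, m):
--     def tri(x):
--         return x * (x + 1) // 2 if x > 0 else 0
--     return tri(m) - tri(n - 1)
-- ===== Notes on version B (the rewrite author's own statement) =====
-- stated objective: faster
-- what changed: Replaced the two accumulation loops over range(1,n) and range(1,m+1) by the closed-form triangular-number formula x*(x+1)//2 (clamped at 0 for non-positive bounds).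
import Mathlib
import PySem

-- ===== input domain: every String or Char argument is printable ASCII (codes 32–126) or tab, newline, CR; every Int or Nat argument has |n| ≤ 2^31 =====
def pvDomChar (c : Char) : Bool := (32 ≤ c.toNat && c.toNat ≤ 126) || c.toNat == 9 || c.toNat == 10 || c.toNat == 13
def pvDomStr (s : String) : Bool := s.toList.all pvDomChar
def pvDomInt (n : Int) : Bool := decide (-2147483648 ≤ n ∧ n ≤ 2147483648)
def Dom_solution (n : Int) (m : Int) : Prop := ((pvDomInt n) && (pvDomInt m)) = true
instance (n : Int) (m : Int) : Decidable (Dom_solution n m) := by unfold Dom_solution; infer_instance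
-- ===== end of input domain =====

-- B replaces the two summation loops by the closed-form triangular formula; faster (O(1) vs O(n+m)).

-- ===== PORT A =====
def solution (n : Int) (m : Int) : Int :=
  let sum_n := (PySem.List.pyRange 1 n 1).foldl (fun acc i => acc + i) 0
  let sum_m := (PySem.List.pyRange 1 (m + 1) 1).foldl (fun acc i => acc + i) 0
  sum_m - sum_n

-- ===== PORT B =====
def triB (x : Int) : Int := if 0 < x then PySem.Int.floordiv (x * (x + 1)) 2 else 0

def solution_alt (n : Int) (m : Int) : Int := triB m - triB (n - 1)

-- ===== PRECONDITION & SPEC =====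
def Spec_solution (n : Int) (m : Int) (out : Int) : Prop := out = solution_alt n m
instance (n : Int) (m : Int) (out : Int) : Decidable (Spec_solution n m out) := by unfold Spec_solution; infer_instance

-- ===== CLAIM (what is proved, stated in full; the proofs are below) =====
def Claim_equal_solution : Prop := ∀ (n : Int) (m : Int), Dom_solution n m → Spec_solution n m (solution n m)

-- ===== LEMMAS AND PROOFS =====

theorem triB_succ (c : Int) (hc : 0 < c) : triB c = triB (c - 1) + c := by
  unfold triB
  rw [PySem.Int.floordiv_eq_ediv_of_pos (by norm_num)]
  by_cases h1 : 0 < c - 1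
  · rw [if_pos hc, if_pos h1, PySem.Int.floordiv_eq_ediv_of_pos (by norm_num)]
    rcases Int.even_or_odd c with ⟨a, ha⟩ | ⟨a, ha⟩
    · subst ha
      have e1 : (a + a) * (a + a + 1) = 2 * (a * (2 * a + 1)) := by ring
      have e2 : (a + a - 1) * (a + a - 1 + 1) = 2 * (a * (2 * a - 1)) := by ring
      rw [e1, e2, Int.mul_ediv_cancel_left _ (by norm_num), Int.mul_ediv_cancel_left _ (by norm_num)]
      ring
    · subst ha
      have e1 : (2 * a + 1) * (2 * a + 1 + 1) = 2 * ((2 * a + 1) * (a + 1)) := by ring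
      have e2 : (2 * a + 1 - 1) * (2 * a + 1 - 1 + 1) = 2 * (a * (2 * a + 1)) := by ring
      rw [e1, e2, Int.mul_ediv_cancel_left _ (by norm_num), Int.mul_ediv_cancel_left _ (by norm_num)]
      ring
  · have hc1 : c = 1 := by omega
    subst hc1; norm_num

theorem sum_pyRange_tri (k : Nat) : ∀ (b : Int), (b - 1).toNat = k →
    (PySem.List.pyRange 1 b 1).foldl (fun acc i => acc + i) 0 = triB (b - 1) := by
  induction k with
  | zero =>
    intro b hb
    have hb1 : b ≤ 1 := by omega
    rw [PySem.List.pyRange_one_eq_nil hb1]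
    simp [triB]
    omega
  | succ k ih =>
    intro b hb
    have h1 : (1 : Int) ≤ b - 1 := by omega
    have hsplit : b = (b - 1) + 1 := by ring
    rw [hsplit, PySem.List.pyRange_one_succ_right (by omega), List.foldl_append,
      ih (b - 1) (by omega)]
    simp only [List.foldl_cons, List.foldl_nil]
    have := triB_succ (b - 1) (by omega)
    simp only [show b - 1 + 1 - 1 = b - 1 by ring]
    omega

-- ===== VERDICT (by name: the statement is the Claim_ definition above) =====
theorem solution_spec : Claim_equal_solution := by
  intro n m _
  unfold Spec_solution solution solution_alt
  rw [sum_pyRange_tri (n - 1).toNat n rfl, sum_pyRange_tri m.toNat (m + 1) (by omega)]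
  simp only [show m + 1 - 1 = m by ring]
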